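-- pv_equiv track=rewrite | github.com/SpyrosMouselinos/PyLexa | PyLexa.py | word_to_command
-- ===== SOURCE A (Python) =====
-- def word_to_command(captured, hot_words):
--     command = None
--     for word in captured:
--         for keys in hot_words:
--             if word.lower() == keys[0].lower():
--                 command = keys[1]
--                 break
--     return command
-- ===== SOURCE B (Python) =====
-- def word_to_command(captured, hot_words):
--     for word in reversed(captured):
--         hit = next((keys[1] for keys in hot_words if word.lower() == keys[0].lower()), None)
--         if hit is not None:
--             return hit
--     return None
-- ===== Notes on version B (the rewrite author's own statement) =====
-- stated objective: simpler
-- what changed: Replaces the exhaustive forward scan-and-overwrite with a backward traversal that early-returns the first (i.e. last-in-order) captured word's first matching hot-word key.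
import Mathlib
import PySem

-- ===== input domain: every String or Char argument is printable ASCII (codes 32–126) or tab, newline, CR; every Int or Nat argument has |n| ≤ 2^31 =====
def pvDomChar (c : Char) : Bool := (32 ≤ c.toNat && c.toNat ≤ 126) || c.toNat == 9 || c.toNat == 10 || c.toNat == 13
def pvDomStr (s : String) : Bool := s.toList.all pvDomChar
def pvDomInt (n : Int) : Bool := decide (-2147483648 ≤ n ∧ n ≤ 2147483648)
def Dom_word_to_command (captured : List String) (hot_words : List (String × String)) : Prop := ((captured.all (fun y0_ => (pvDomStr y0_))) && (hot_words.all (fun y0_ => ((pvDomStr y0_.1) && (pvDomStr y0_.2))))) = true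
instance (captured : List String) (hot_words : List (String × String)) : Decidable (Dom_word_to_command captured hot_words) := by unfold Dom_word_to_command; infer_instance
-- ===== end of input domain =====

-- B replaces the forward scan-and-overwrite with a backward traversal that returns
-- on the first (i.e. last-in-order) matching captured word: simpler, early exit.
-- ===== PORT A =====
def wtcInner (word : String) : List (String × String) → Option String → Option String
  | [], command => command
  | keys :: rest, command =>
    if PySem.Str.lower word == PySem.Str.lower keys.1 then some keys.2
    else wtcInner word rest command

def word_to_command (captured : List String) (hot_words : List (String × String)) : Option String :=
  captured.foldl (fun command word => wtcInner word hot_words command) none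

-- ===== PORT B =====
def wtcHit (hot_words : List (String × String)) (word : String) : Option String :=
  (hot_words.find? (fun keys => PySem.Str.lower word == PySem.Str.lower keys.1)).map (·.2)

def wtcLoop (hot_words : List (String × String)) : List String → Option String
  | [] => none
  | word :: rest =>
    match wtcHit hot_words word with
    | some hit => some hit
    | none => wtcLoop hot_words rest

def word_to_command_alt (captured : List String) (hot_words : List (String × String)) : Option String :=
  wtcLoop hot_words captured.reverse

-- ===== PRECONDITION & SPEC =====
def Spec_word_to_command (captured : List String) (hot_words : List (String × String)) (out : Option String) : Prop := out = word_to_command_alt captured hot_words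
instance (captured : List String) (hot_words : List (String × String)) (out : Option String) : Decidable (Spec_word_to_command captured hot_words out) := by unfold Spec_word_to_command; infer_instance

-- ===== CLAIM (what is proved, stated in full; the proofs are below) =====
def Claim_equal_word_to_command : Prop := ∀ (captured : List String) (hot_words : List (String × String)), Dom_word_to_command captured hot_words → Spec_word_to_command captured hot_words (word_to_command captured hot_words)

-- ===== LEMMAS AND PROOFS =====
theorem wtcInner_eq_or (word : String) (hw : List (String × String)) (c : Option String) :
    wtcInner word hw c = (wtcHit hw word).or c := by
  induction hw with
  | nil => simp [wtcInner, wtcHit]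
  | cons k ks ih =>
    by_cases h : PySem.Str.lower word == PySem.Str.lower k.1
    · simp [wtcInner, wtcHit, List.find?, h]
    · simp only [wtcInner, wtcHit, List.find?, h] at *
      simpa [wtcHit] using ih

theorem wtcLoop_append (hw : List (String × String)) (xs ys : List String) :
    wtcLoop hw (xs ++ ys) = (wtcLoop hw xs).or (wtcLoop hw ys) := by
  induction xs with
  | nil => simp [wtcLoop]
  | cons x xs ih =>
    simp only [List.cons_append, wtcLoop]
    cases wtcHit hw x <;> simp [ih]

theorem wtc_fold_eq (hw : List (String × String)) (xs : List String) (c : Option String) :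
    xs.foldl (fun command word => wtcInner word hw command) c = (wtcLoop hw xs.reverse).or c := by
  induction xs generalizing c with
  | nil => simp [wtcLoop]
  | cons x xs ih =>
    rw [List.foldl_cons, ih, wtcInner_eq_or, List.reverse_cons, wtcLoop_append]
    cases wtcLoop hw xs.reverse <;> cases h : wtcHit hw x <;> simp [wtcLoop, h]


-- ===== VERDICT (by name: the statement is the Claim_ definition above) =====
theorem word_to_command_spec : Claim_equal_word_to_command := by
  intro captured hot_words _
  unfold Spec_word_to_command word_to_command word_to_command_alt
  rw [wtc_fold_eq]
  cases wtcLoop hot_words captured.reverse <;> rfl
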